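-- pv_equiv track=rewrite | github.com/akm7289/CTRNN | CTRNNLIB/shuttleDesignTest/test.py | solutionx
-- ===== SOURCE A (Python) =====
-- def solutionx(A):
--     # Implement your solution here
--     counter=0
--     for i in range(len(A)-1):
--         for j in range(i,len(A)):
--             if i==j:
--                 continue
--             if j-i<=A[j]+A[i]:
--                 counter+=1
--     return counter
-- ===== SOURCE B (Python) =====
-- def solutionx(A):
--     # j - i <= A[i] + A[j]  (i < j)  <=>  j - A[j] <= i + A[i].
--     # Sweep j left to right keeping the values i + A[i] of earlier indices
--     # in a sorted list; count those >= j - A[j] by binary search.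
--     rs = []
--     total = 0
--     for j, aj in enumerate(A):
--         lj = j - aj
--         lo, hi = 0, len(rs)
--         while lo < hi:
--             mid = (lo + hi) // 2
--             if rs[mid] < lj:
--                 lo = mid + 1
--             else:
--                 hi = mid
--         total += len(rs) - lo
--         x = j + aj
--         lo2, hi2 = 0, len(rs)
--         while lo2 < hi2:
--             mid = (lo2 + hi2) // 2
--             if rs[mid] < x:
--                 lo2 = mid + 1
--             else:
--                 hi2 = mid
--         rs.insert(lo2, x)
--     return total
-- ===== Notes on version B (the rewrite author's own statement) =====
-- stated objective: faster
-- what changed: Rewrites the pair condition j-i <= A[i]+A[j] as j-A[j] <= i+A[i] and replaces the nested O(n^2) scan by a single left-to-right sweep that keeps the values i+A[i] of earlier indices in a sorted list and counts the qualifying earlier indices by binary search.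
import Mathlib
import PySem

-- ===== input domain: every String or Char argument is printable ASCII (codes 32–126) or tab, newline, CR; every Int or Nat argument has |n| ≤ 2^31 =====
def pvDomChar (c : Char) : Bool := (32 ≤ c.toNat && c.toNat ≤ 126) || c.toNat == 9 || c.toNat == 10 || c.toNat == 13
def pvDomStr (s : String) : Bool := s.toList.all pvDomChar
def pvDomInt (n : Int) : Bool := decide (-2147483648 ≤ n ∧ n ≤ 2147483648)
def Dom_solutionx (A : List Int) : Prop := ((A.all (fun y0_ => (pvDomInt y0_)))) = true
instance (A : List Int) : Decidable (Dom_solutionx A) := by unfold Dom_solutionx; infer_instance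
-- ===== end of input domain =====

-- B replaces A's nested O(n^2) pair scan by one sorted-prefix sweep with binary search (measured faster).


-- ===== PORT A =====
def solutionx (A : List Int) : Int :=
  (PySem.List.pyRange 0 ((A.length : Int) - 1) 1).foldl (fun counter i =>
    (PySem.List.pyRange i (A.length : Int) 1).foldl (fun c j =>
      if i == j then c
      else if j - i ≤ PySem.List.pyGetD A j 0 + PySem.List.pyGetD A i 0 then c + 1
      else c) counter) 0

-- ===== PORT B =====
-- the two 'while lo < hi' binary-search loops of Source B; '(lo + hi) // 2' is ported as
-- Nat division, exact here because lo and hi are nonnegative Python ints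
def pvBisect (rs : List Int) (x : Int) (lo hi : Nat) : Nat :=
  if _h : lo < hi then
    let mid := (lo + hi) / 2
    if PySem.List.pyGetD rs (mid : Int) 0 < x then pvBisect rs x (mid + 1) hi
    else pvBisect rs x lo mid
  else lo
termination_by hi - lo
decreasing_by all_goals omega

def solutionx_alt (A : List Int) : Int :=
  let st := (PySem.List.enumerate A 0).foldl (fun (st : List Int × Int) p =>
    let rs := st.1
    let lj := p.1 - p.2
    let lo := pvBisect rs lj 0 rs.length
    let total := st.2 + ((rs.length : Int) - (lo : Int))
    let x := p.1 + p.2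
    let lo2 := pvBisect rs x 0 rs.length
    (PySem.List.insert rs (lo2 : Int) x, total)) ([], 0)
  st.2

-- ===== PRECONDITION & SPEC =====
def Spec_solutionx (A : List Int) (out : Int) : Prop := out = solutionx_alt A
instance (A : List Int) (out : Int) : Decidable (Spec_solutionx A out) := by unfold Spec_solutionx; infer_instance

-- ===== CLAIM (what is proved, stated in full; the proofs are below) =====
def Claim_equal_solutionx : Prop := ∀ (A : List Int), Dom_solutionx A → Spec_solutionx A (solutionx A)

-- ===== LEMMAS AND PROOFS =====

-- the pair condition, parametrised by the two index/value pairs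
def pvP (A : List Int) (i j : Int) : Bool :=
  decide (j - i ≤ PySem.List.pyGetD A j 0 + PySem.List.pyGetD A i 0)

-- ---- binary search: on a sorted list it returns the number of elements < x ----

lemma pvCountP_of_split (p : Int → Bool) (rs : List Int) (lo : Nat) (hlo : lo ≤ rs.length)
    (h1 : ∀ (k : Nat) (h : k < rs.length), k < lo → p rs[k])
    (h2 : ∀ (k : Nat) (h : k < rs.length), lo ≤ k → ¬ p rs[k]) :
    rs.countP p = lo := by
  have hsplit : rs = rs.take lo ++ rs.drop lo := (List.take_append_drop lo rs).symm
  rw [hsplit, List.countP_append]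
  have htake : (rs.take lo).countP p = (rs.take lo).length := by
    apply List.countP_eq_length.2
    intro y hy
    obtain ⟨k, hk, hky⟩ := List.mem_iff_getElem.1 hy
    rw [List.length_take] at hk
    have hk' : k < rs.length := by omega
    rw [← hky, List.getElem_take]
    exact h1 k hk' (by omega)
  have hdrop : (rs.drop lo).countP p = 0 := by
    apply List.countP_eq_zero.2
    intro y hy
    obtain ⟨k, hk, hky⟩ := List.mem_iff_getElem.1 hy
    rw [List.length_drop] at hk
    have hk' : lo + k < rs.length := by omega
    rw [← hky, List.getElem_drop]
    exact h2 (lo + k) hk' (Nat.le_add_right _ _)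
  rw [htake, hdrop, List.length_take]
  omega

lemma pvBisect_go (rs : List Int) (x : Int) (hs : rs.Pairwise (· ≤ ·)) :
    ∀ (lo hi : Nat), lo ≤ hi → hi ≤ rs.length →
    (∀ (k : Nat) (h : k < rs.length), k < lo → rs[k] < x) →
    (∀ (k : Nat) (h : k < rs.length), hi ≤ k → ¬ rs[k] < x) →
    pvBisect rs x lo hi = rs.countP (fun r => decide (r < x)) := by
  intro lo hi
  induction hn : hi - lo using Nat.strong_induction_on generalizing lo hi with
  | _ d ih =>
    intro hle hhi h1 h2
    rw [pvBisect]
    by_cases h : lo < hi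
    · simp only [h, dif_pos]
      have hmidlt : (lo + hi) / 2 < hi := by omega
      have hmidge : lo ≤ (lo + hi) / 2 := by omega
      have hmidlen : (lo + hi) / 2 < rs.length := lt_of_lt_of_le hmidlt hhi
      rw [PySem.List.pyGetD_natCast, List.getD_eq_getElem _ _ hmidlen]
      have hpair := List.pairwise_iff_getElem.1 hs
      by_cases hc : rs[(lo + hi) / 2] < x
      · simp only [hc, if_pos]
        exact ih (hi - ((lo + hi) / 2 + 1)) (by omega) _ _ (by omega) (by omega) hhi
          (fun k hk hklt => by
            rcases Nat.lt_or_ge k ((lo + hi) / 2) with hlt | hge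
            · exact lt_of_le_of_lt (hpair k ((lo + hi) / 2) hk hmidlen hlt) hc
            · have : k = (lo + hi) / 2 := by omega
              subst this; exact hc)
          h2
      · simp only [hc, if_false]
        exact ih ((lo + hi) / 2 - lo) (by omega) _ _ (by omega) hmidge (le_of_lt hmidlen) h1
          (fun k hk hkge => by
            rcases Nat.lt_or_ge ((lo + hi) / 2) k with hlt | hge
            · intro hlt2
              exact hc (lt_of_le_of_lt (hpair ((lo + hi) / 2) k hmidlen hk hlt) hlt2)
            · have : k = (lo + hi) / 2 := by omega
              subst this; exact hc)
    · simp only [h, dif_neg, not_false_iff]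
      have : lo = hi := by omega
      subst this
      exact (pvCountP_of_split _ rs lo (le_trans hle hhi)
        (fun k hk hkl => by simpa using h1 k hk hkl)
        (fun k hk hkg => by simpa using h2 k hk hkg)).symm

lemma pvSorted_pos (rs : List Int) (x : Int) (hs : rs.Pairwise (· ≤ ·)) :
    (∀ (k : Nat) (h : k < rs.length), k < rs.countP (fun r => decide (r < x)) → rs[k] < x) ∧
    (∀ (k : Nat) (h : k < rs.length), rs.countP (fun r => decide (r < x)) ≤ k → ¬ rs[k] < x) := by
  induction rs with
  | nil => simp
  | cons y t ih =>
    obtain ⟨hy, ht⟩ := List.pairwise_cons.1 hs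
    obtain ⟨ih1, ih2⟩ := ih ht
    by_cases hc : y < x
    · have hcnt : (y :: t).countP (fun r => decide (r < x))
          = t.countP (fun r => decide (r < x)) + 1 := by simp [hc]
      rw [hcnt]
      constructor
      · intro k hk hklt
        cases k with
        | zero => simpa using hc
        | succ k =>
          simp only [List.getElem_cons_succ]
          exact ih1 k (by simpa using hk) (by omega)
      · intro k hk hkge
        cases k with
        | zero => omega
        | succ k =>
          simp only [List.getElem_cons_succ]
          exact ih2 k (by simpa using hk) (by omega)
    · have hzero : (y :: t).countP (fun r => decide (r < x)) = 0 := by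
        apply List.countP_eq_zero.2
        intro z hz
        rcases List.mem_cons.1 hz with rfl | hzt
        · simpa using hc
        · have := hy z hzt
          simp only [decide_eq_true_eq]
          omega
      rw [hzero]
      refine ⟨fun k hk hklt => absurd hklt (by omega), fun k hk _ => ?_⟩
      cases k with
      | zero => simpa using hc
      | succ k =>
        have hmem : t[k]'(by simpa using hk) ∈ t := List.getElem_mem _
        have := hy _ hmem
        simp only [List.getElem_cons_succ, not_lt]
        omega

lemma pvInsert_sorted (rs : List Int) (x : Int) (hs : rs.Pairwise (· ≤ ·)) :
    (rs.take (rs.countP (fun r => decide (r < x))) ++ x :: rs.drop (rs.countP (fun r => decide (r < x)))).Pairwise (· ≤ ·) := by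
  set p := rs.countP (fun r => decide (r < x)) with hp
  obtain ⟨h1, h2⟩ := pvSorted_pos rs x hs
  have hple : p ≤ rs.length := List.countP_le_length
  rw [List.pairwise_append]
  refine ⟨hs.sublist (List.take_sublist _ _), ?_, ?_⟩
  · rw [List.pairwise_cons]
    refine ⟨?_, hs.sublist (List.drop_sublist _ _)⟩
    intro z hz
    obtain ⟨k, hk, hkz⟩ := List.mem_iff_getElem.1 hz
    have hk' : p + k < rs.length := by
      simp only [List.length_drop] at hk; omega
    rw [← hkz, List.getElem_drop]
    have := h2 (p + k) hk' (Nat.le_add_right _ _)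
    omega
  · intro a ha b hb
    obtain ⟨k, hk, hka⟩ := List.mem_iff_getElem.1 ha
    have hk' : k < rs.length := by
      simp only [List.length_take] at hk; omega
    have hklt : k < p := by simp only [List.length_take] at hk; omega
    have hax : a < x := by rw [← hka, List.getElem_take]; exact h1 k hk' hklt
    rcases List.mem_cons.1 hb with rfl | hbd
    · omega
    · obtain ⟨m, hm, hmb⟩ := List.mem_iff_getElem.1 hbd
      have hm' : p + m < rs.length := by simp only [List.length_drop] at hm; omega
      have := h2 (p + m) hm' (Nat.le_add_right _ _)
      rw [← hmb, List.getElem_drop]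
      omega

-- ---- the r-values of the first m indices ----

def pvR (A : List Int) (m : Nat) : List Int :=
  (PySem.List.pyRange 0 (m : Int) 1).map (fun i => i + PySem.List.pyGetD A i 0)

-- B's partial count after the first m indices
def pvC (A : List Int) (m : Nat) : Int :=
  (((PySem.List.pyRange 0 (m : Int) 1).map
    (fun j => ((PySem.List.pyRange 0 j 1).countP (fun i => pvP A i j) : Int)))).sum

-- the loop state invariant of B's sweep
def pvInv (A : List Int) (m : Nat) (st : List Int × Int) : Prop :=
  st.1.Perm (pvR A m) ∧ st.1.Pairwise (· ≤ ·) ∧ st.2 = pvC A m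

-- one step of B's sweep preserves the invariant
lemma pvStep (A : List Int) (m : Nat) (st : List Int × Int) (h : pvInv A m st) :
    pvInv A (m + 1)
      ((fun (st : List Int × Int) (p : Int × Int) =>
        let rs := st.1
        let lj := p.1 - p.2
        let lo := pvBisect rs lj 0 rs.length
        let total := st.2 + ((rs.length : Int) - (lo : Int))
        let x := p.1 + p.2
        let lo2 := pvBisect rs x 0 rs.length
        (PySem.List.insert rs (lo2 : Int) x, total)) st ((m : Int), PySem.List.pyGetD A (m : Int) 0)) := by
  obtain ⟨hperm, hsort, htot⟩ := h
  set a := PySem.List.pyGetD A (m : Int) 0 with ha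
  have hlenR : (pvR A m).length = m := by
    simp [pvR, PySem.List.length_pyRange_one]
  have hlen : st.1.length = m := hperm.length_eq.trans hlenR
  have hbis : ∀ y : Int, pvBisect st.1 y 0 st.1.length
      = st.1.countP (fun r => decide (r < y)) := by
    intro y
    exact pvBisect_go st.1 y hsort 0 st.1.length (Nat.zero_le _) le_rfl
      (fun k hk hkl => by omega) (fun k hk hkg => by omega)
  have hcnt : ∀ y : Int, st.1.countP (fun r => decide (r < y))
      = (PySem.List.pyRange 0 (m : Int)).countP (fun i => decide (i + PySem.List.pyGetD A i 0 < y)) := by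
    intro y
    rw [hperm.countP_eq, pvR, List.countP_map]
    rfl
  have hRsucc : pvR A (m + 1) = pvR A m ++ [(m : Int) + a] := by
    unfold pvR
    rw [show (((m : Nat) + 1 : Nat) : Int) = (m : Int) + 1 by push_cast; ring,
      PySem.List.pyRange_one_succ_right (by positivity), List.map_append]
    rfl
  have hCsucc : pvC A (m + 1) = pvC A m
      + ((PySem.List.pyRange 0 (m : Int)).countP (fun i => pvP A i (m : Int)) : Int) := by
    unfold pvC
    rw [show (((m : Nat) + 1 : Nat) : Int) = (m : Int) + 1 by push_cast; ring,
      PySem.List.pyRange_one_succ_right (by positivity), List.map_append, List.sum_append]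
    simp
  refine ⟨?_, ?_, ?_⟩
  · -- permutation
    show (PySem.List.insert st.1 ((pvBisect st.1 ((m : Int) + a) 0 st.1.length : Nat) : Int)
        ((m : Int) + a)).Perm (pvR A (m + 1))
    rw [hbis, PySem.List.insert_natCast _ _ _ List.countP_le_length, hRsucc]
    calc (st.1.take (st.1.countP (fun r => decide (r < (m : Int) + a)))
            ++ ((m : Int) + a) :: st.1.drop (st.1.countP (fun r => decide (r < (m : Int) + a)))).Perm
          (((m : Int) + a) :: (st.1.take _ ++ st.1.drop _)) := List.perm_middle
      _ = ((m : Int) + a) :: st.1 := by rw [List.take_append_drop]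
      _ |>.Perm (((m : Int) + a) :: pvR A m) := hperm.cons _
      _ |>.Perm (pvR A m ++ [(m : Int) + a]) := (List.perm_append_singleton _ _).symm
  · -- sortedness
    show (PySem.List.insert st.1 ((pvBisect st.1 ((m : Int) + a) 0 st.1.length : Nat) : Int)
        ((m : Int) + a)).Pairwise (· ≤ ·)
    rw [hbis, PySem.List.insert_natCast _ _ _ List.countP_le_length]
    exact pvInsert_sorted st.1 _ hsort
  · -- count
    show st.2 + ((st.1.length : Int) - (pvBisect st.1 ((m : Int) - a) 0 st.1.length : Int))
        = pvC A (m + 1)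
    rw [hbis, hCsucc, htot, hlen]
    congr 1
    have hsplit := List.length_eq_countP_add_countP (fun r => decide (r < (m : Int) - a))
      (l := st.1)
    rw [hlen] at hsplit
    have hnot : st.1.countP (fun r => decide ¬(decide (r < (m : Int) - a)) = true)
        = (PySem.List.pyRange 0 (m : Int)).countP (fun i => pvP A i (m : Int)) := by
      rw [hperm.countP_eq, pvR, List.countP_map]
      apply List.countP_congr
      intro i hi
      simp only [Function.comp, pvP, decide_eq_true_eq]
      constructor
      · intro hge; omega
      · intro hle; omega
    omega

lemma pvB_invariant (A : List Int) (m : Nat) :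
    pvInv A m (((PySem.List.pyRange 0 (m : Int) 1).map
      (fun j => (j, PySem.List.pyGetD A j 0))).foldl (fun (st : List Int × Int) p =>
        let rs := st.1
        let lj := p.1 - p.2
        let lo := pvBisect rs lj 0 rs.length
        let total := st.2 + ((rs.length : Int) - (lo : Int))
        let x := p.1 + p.2
        let lo2 := pvBisect rs x 0 rs.length
        (PySem.List.insert rs (lo2 : Int) x, total)) ([], 0)) := by
  induction m with
  | zero =>
    simp only [Nat.cast_zero]
    rw [PySem.List.pyRange_one_eq_nil le_rfl]
    refine ⟨?_, by simp, ?_⟩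
    · rw [pvR]; simp only [Nat.cast_zero]
      rw [PySem.List.pyRange_one_eq_nil le_rfl]; simp
    · rw [pvC]; simp only [Nat.cast_zero]
      rw [PySem.List.pyRange_one_eq_nil le_rfl]; simp
  | succ m ih =>
    rw [show (((m : Nat) + 1 : Nat) : Int) = (m : Int) + 1 by push_cast; ring,
      PySem.List.pyRange_one_succ_right (by positivity), List.map_append, List.foldl_append,
      List.map_cons, List.map_nil, List.foldl_cons, List.foldl_nil]
    exact pvStep A m _ ih

-- ---- summation transpose: A's row sums equal B's column sums ----

lemma pvTranspose (A : List Int) (n : Nat) :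
    (((PySem.List.pyRange 0 (n : Int) 1).map
      (fun i => ((PySem.List.pyRange (i + 1) (n : Int) 1).countP (fun j => pvP A i j) : Int))).sum)
    = pvC A n := by
  induction n with
  | zero =>
    rw [pvC]
    simp only [Nat.cast_zero]
    rw [PySem.List.pyRange_one_eq_nil le_rfl]
    simp
  | succ n ih =>
    have hcast : (((n : Nat) + 1 : Nat) : Int) = (n : Int) + 1 := by push_cast; ring
    rw [hcast, PySem.List.pyRange_one_succ_right (by positivity)]
    have hmap : (PySem.List.pyRange 0 (n : Int)).map
        (fun i => (((PySem.List.pyRange (i + 1) ((n : Int) + 1)).countP (fun j => pvP A i j) : Nat) : Int))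
        = (PySem.List.pyRange 0 (n : Int)).map
        (fun i => (((PySem.List.pyRange (i + 1) (n : Int)).countP (fun j => pvP A i j) : Nat) : Int)
          + (if pvP A i (n : Int) then 1 else 0)) := by
      apply List.map_congr_left
      intro i hi
      have hibd := PySem.List.mem_pyRange_one.1 hi
      rw [PySem.List.pyRange_one_succ_right (by omega), List.countP_append]
      simp only [List.countP_cons, List.countP_nil]
      push_cast
      by_cases hp : pvP A i (n : Int) <;> simp [hp]
    rw [List.map_append, List.sum_append, hmap, PySem.List.sum_map_add_int]
    rw [PySem.List.sum_map_ite_one_zero (fun i => pvP A i (n : Int))]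
    have hlast : ((PySem.List.pyRange ((n : Int) + 1) ((n : Int) + 1)).countP
        (fun j => pvP A (n : Int) j) : Int) = 0 := by
      rw [PySem.List.pyRange_one_eq_nil le_rfl]; rfl
    simp only [List.map_cons, List.map_nil, List.sum_cons, List.sum_nil, hlast]
    rw [ih]
    rw [pvC, pvC, hcast, PySem.List.pyRange_one_succ_right (by positivity),
      List.map_append, List.sum_append]
    simp only [List.map_cons, List.map_nil, List.sum_cons, List.sum_nil]
    ring

lemma pvA_eval (A : List Int) :
    solutionx A = (((PySem.List.pyRange 0 ((A.length : Int)) 1).map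
      (fun i => ((PySem.List.pyRange (i + 1) (A.length : Int) 1).countP (fun j => pvP A i j) : Int))).sum) := by
  unfold solutionx
  rcases Nat.eq_zero_or_pos A.length with h0 | hpos
  · rw [h0]
    rw [show ((0 : Nat) : Int) - 1 = -1 by rfl, PySem.List.pyRange_one_eq_nil (by omega),
      show ((0 : Nat) : Int) = 0 by rfl, PySem.List.pyRange_one_eq_nil le_rfl]
    simp
  · -- rewrite the inner loop into a countP
    have hinner : ∀ (c : Int), ∀ i ∈ PySem.List.pyRange 0 ((A.length : Int) - 1),
        (PySem.List.pyRange i (A.length : Int)).foldl (fun c j =>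
          if i == j then c
          else if j - i ≤ PySem.List.pyGetD A j 0 + PySem.List.pyGetD A i 0 then c + 1
          else c) c
        = c + ((PySem.List.pyRange (i + 1) (A.length : Int)).countP (fun j => pvP A i j) : Int) := by
      intro c i hi
      have hibd := PySem.List.mem_pyRange_one.1 hi
      rw [PySem.List.pyRange_one_cons (by omega), List.foldl_cons]
      rw [if_pos (by simp)]
      rw [PySem.List.foldl_congr_mem _ _ (fun c j =>
          if ((j : Int) - i ≤ PySem.List.pyGetD A j 0 + PySem.List.pyGetD A i 0 : Prop) then c + 1 else c) c
        (by
          intro acc j hj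
          have hjbd := PySem.List.mem_pyRange_one.1 hj
          have : (i == j) = false := by simp; omega
          rw [this]
          simp)]
      rw [PySem.List.foldl_ite_add_one]
      rfl
    rw [PySem.List.foldl_congr_mem _ _ (fun (c : Int) (i : Int) =>
        c + ((PySem.List.pyRange (i + 1) (A.length : Int)).countP (fun j => pvP A i j) : Int)) 0
      (fun acc i hi => hinner acc i hi)]
    rw [PySem.List.foldl_add]
    rw [show (A.length : Int) = ((A.length : Int) - 1) + 1 by ring]
    rw [PySem.List.pyRange_one_succ_right (by omega), List.map_append, List.sum_append]
    have hlast : ((PySem.List.pyRange (((A.length : Int) - 1) + 1) (((A.length : Int) - 1) + 1)).countP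
        (fun j => pvP A ((A.length : Int) - 1) j) : Int) = 0 := by
      rw [PySem.List.pyRange_one_eq_nil le_rfl]; rfl
    simp only [List.map_cons, List.map_nil, List.sum_cons, List.sum_nil, hlast]
    ring

lemma pvB_eval (A : List Int) : solutionx_alt A = pvC A A.length := by
  unfold solutionx_alt
  rw [PySem.List.enumerate_eq_map_pyRange A 0, PySem.List.len_eq]
  exact (pvB_invariant A A.length).2.2

-- ===== VERDICT (by name: the statement is the Claim_ definition above) =====
theorem solutionx_spec : Claim_equal_solutionx := by
  intro A _
  unfold Spec_solutionx
  rw [pvA_eval, pvB_eval, pvTranspose]
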